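-- pv_equiv track=rewrite | github.com/lindolib4/football_ai | toto/optimizer.py | _coupon_uniqueness_stats
-- ===== SOURCE A (Python) =====
-- def _coupon_uniqueness_stats(coupons: list[list[str]]) -> dict[str, int]:
--     generated = len(coupons)
--     unique = len({tuple(coupon) for coupon in coupons})
--     return {
--         "generated_coupon_count": generated,
--         "unique_coupon_count": unique,
--         "duplicate_coupon_count": max(generated - unique, 0),
--     }
-- ===== SOURCE B (Python) =====
-- def _coupon_uniqueness_stats(coupons: list[list[str]]) -> dict[str, int]:
--     def count_new(prefix, rest):
--         if not rest:
--             return 0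
--         head = rest[0]
--         return (0 if head in prefix else 1) + count_new(prefix + [head], rest[1:])
--
--     generated = len(coupons)
--     unique = count_new([], coupons)
--     return {
--         "generated_coupon_count": generated,
--         "unique_coupon_count": unique,
--         "duplicate_coupon_count": generated - unique,
--     }
-- ===== Notes on version B (the rewrite author's own statement) =====
-- stated objective: alternative
-- what changed: Replaces A's hash-set comprehension and max(generated-unique,0) guard by a recursive first-occurrence count that tests each coupon against the plain list prefix of earlier coupons (no set, no guard), trading O(n) hashing for an O(n^2) prefix scan.
import Mathlib
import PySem

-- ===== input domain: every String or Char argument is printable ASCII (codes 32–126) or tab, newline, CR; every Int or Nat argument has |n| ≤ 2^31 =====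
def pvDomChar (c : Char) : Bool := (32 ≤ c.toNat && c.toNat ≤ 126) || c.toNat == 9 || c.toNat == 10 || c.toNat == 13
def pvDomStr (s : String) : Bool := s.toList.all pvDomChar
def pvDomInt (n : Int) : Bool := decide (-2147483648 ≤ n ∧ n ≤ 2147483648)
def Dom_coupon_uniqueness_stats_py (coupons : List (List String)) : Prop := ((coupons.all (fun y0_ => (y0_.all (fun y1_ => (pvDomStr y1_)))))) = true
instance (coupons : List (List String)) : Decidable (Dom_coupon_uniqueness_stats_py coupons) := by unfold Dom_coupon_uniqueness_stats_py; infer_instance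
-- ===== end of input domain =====

-- B drops A's hash set entirely: it counts first occurrences recursively against the growing
-- prefix list and gets duplicates as plain generated - unique (objective: alternative).

-- ===== PORT A =====
-- A: generated = len(coupons); unique = len({tuple(c) for c in coupons}); dict with max(generated-unique, 0)
def coupon_uniqueness_stats_py (coupons : List (List String)) : List (String × Int) :=
  let generated : Int := coupons.length
  let unique : Int := (PySem.Set.ofList coupons).length
  [("generated_coupon_count", generated),
   ("unique_coupon_count", unique),
   ("duplicate_coupon_count", max (generated - unique) 0)]

-- ===== PORT B =====
-- B's helper: count_new(prefix, rest) = (0 if rest[0] in prefix else 1) + count_new(prefix + [rest[0]], rest[1:])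
def pvCountNew : List (List String) → List (List String) → Int
  | _, [] => 0
  | pre, head :: rest => (if head ∈ pre then 0 else 1) + pvCountNew (pre ++ [head]) rest

def coupon_uniqueness_stats_py_alt (coupons : List (List String)) : List (String × Int) :=
  let generated : Int := coupons.length
  let unique : Int := pvCountNew [] coupons
  [("generated_coupon_count", generated),
   ("unique_coupon_count", unique),
   ("duplicate_coupon_count", generated - unique)]

-- ===== PRECONDITION & SPEC =====
def Spec_coupon_uniqueness_stats_py (coupons : List (List String)) (out : List (String × Int)) : Prop := out = coupon_uniqueness_stats_py_alt coupons
instance (coupons : List (List String)) (out : List (String × Int)) : Decidable (Spec_coupon_uniqueness_stats_py coupons out) := by unfold Spec_coupon_uniqueness_stats_py; infer_instance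

-- ===== CLAIM (what is proved, stated in full; the proofs are below) =====
def Claim_equal_coupon_uniqueness_stats_py : Prop := ∀ (coupons : List (List String)), Dom_coupon_uniqueness_stats_py coupons → Spec_coupon_uniqueness_stats_py coupons (coupon_uniqueness_stats_py coupons)

-- ===== LEMMAS AND PROOFS =====
theorem pv_len_add (s : PySem.Set (List String)) (c : List String) :
    (PySem.Set.add s c).length = if c ∈ s then s.length else s.length + 1 := by
  simp [PySem.Set.add]; split_ifs <;> simp_all

theorem pv_len_foldl_add : ∀ (l : List (List String)) (s : PySem.Set (List String)),
    (l.foldl PySem.Set.add s).length ≤ s.length + l.length := by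
  intro l
  induction l with
  | nil => intro s; simp
  | cons c rest ih =>
    intro s
    have := ih (PySem.Set.add s c)
    have h := pv_len_add s c
    simp only [List.foldl, List.length_cons]
    split_ifs at h <;> omega

-- the number of first occurrences B counts equals the growth of A's set under the fold
theorem pv_countNew_eq : ∀ (l pre : List (List String)),
    ((l.foldl PySem.Set.add (PySem.Set.ofList pre)).length : Int)
      = ((PySem.Set.ofList pre).length : Int) + pvCountNew pre l := by
  intro l
  induction l with
  | nil => intro pre; simp [pvCountNew]
  | cons head rest ih =>
    intro pre
    have hof : PySem.Set.ofList (pre ++ [head]) = PySem.Set.add (PySem.Set.ofList pre) head := by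
      simp [PySem.Set.ofList_eq_foldl, List.foldl_append]
    have hmem : head ∈ PySem.Set.ofList pre ↔ head ∈ pre := PySem.Set.mem_ofList pre head
    have hlen := pv_len_add (PySem.Set.ofList pre) head
    have ihp := ih (pre ++ [head])
    rw [hof] at ihp
    simp only [List.foldl, pvCountNew]
    rw [ihp]
    by_cases h : head ∈ pre
    · rw [if_pos h]
      rw [if_pos (hmem.mpr h)] at hlen
      rw [hlen]; ring
    · rw [if_neg h]
      rw [if_neg (fun hc => h (hmem.mp hc))] at hlen
      rw [hlen]; push_cast; ring

-- ===== VERDICT (by name: the statement is the Claim_ definition above) =====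
theorem coupon_uniqueness_stats_py_spec : Claim_equal_coupon_uniqueness_stats_py := by
  intro coupons _
  unfold Spec_coupon_uniqueness_stats_py coupon_uniqueness_stats_py coupon_uniqueness_stats_py_alt
  have h := pv_countNew_eq coupons []
  have hle := pv_len_foldl_add coupons (PySem.Set.ofList [])
  rw [PySem.Set.ofList_eq_foldl] at *
  simp only [List.foldl_nil] at *
  simp only [List.length_nil, Nat.cast_zero, zero_add] at h hle
  rw [h]
  have hm : max ((coupons.length : Int) - pvCountNew [] coupons) 0
      = (coupons.length : Int) - pvCountNew [] coupons := by omega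
  rw [hm]
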